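-- pv_equiv track=rewrite | github.com/UcoreAI/sendora-ocr-production | backend/pdftk_form_filler.py | parse_field_data
-- ===== SOURCE A (Python) =====
-- from typing import Dict, Any
--
-- def parse_field_data(field_data: str) -> Dict[str, Any]:
--     """Parse PDFtk field data output"""
--
--     fields = {}
--     current_field = {}
--
--     for line in field_data.split('\n'):
--         line = line.strip()
--         if line.startswith('FieldName:'):
--             if current_field.get('name'):
--                 fields[current_field['name']] = current_field
--             current_field = {'name': line.replace('FieldName:', '').strip()}
--         elif line.startswith('FieldType:'):
--             current_field['type'] = line.replace('FieldType:', '').strip()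
--         elif line.startswith('FieldFlags:'):
--             current_field['flags'] = line.replace('FieldFlags:', '').strip()
--         elif line.startswith('FieldValue:'):
--             current_field['value'] = line.replace('FieldValue:', '').strip()
--
--     if current_field.get('name'):
--         fields[current_field['name']] = current_field
--
--     return fields
-- ===== SOURCE B (Python) =====
-- def parse_field_data(field_data: str):
--     """Parse PDFtk field data output (segment-then-build re-implementation)."""
--     lines = [l.strip() for l in field_data.split('\n')]
--     # drop the preamble before the first FieldName line
--     while lines and not lines[0].startswith('FieldName:'):
--         lines.pop(0)
--     # phase 1: partition into (header, body-lines) records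
--     records = []
--     while lines:
--         head = lines.pop(0)
--         body = []
--         while lines and not lines[0].startswith('FieldName:'):
--             body.append(lines.pop(0))
--         records.append((head, body))
--     # phase 2: build the result dict from the records
--     fields = {}
--     for head, body in records:
--         name = head.replace('FieldName:', '').strip()
--         rec = {'name': name}
--         for l in body:
--             if l.startswith('FieldType:'):
--                 rec['type'] = l.replace('FieldType:', '').strip()
--             elif l.startswith('FieldFlags:'):
--                 rec['flags'] = l.replace('FieldFlags:', '').strip()
--             elif l.startswith('FieldValue:'):
--                 rec['value'] = l.replace('FieldValue:', '').strip()
--         if name: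
--             fields[name] = rec
--     return fields
-- ===== Notes on version B (the rewrite author's own statement) =====
-- stated objective: alternative
-- what changed: Replaces A's single-pass flush-on-delimiter accumulator (a pending current_field dict flushed whenever the next FieldName line or end of input is reached) with a two-phase decomposition: first partition the stripped lines into (header, body) records split at FieldName lines (discarding the preamble), then build and store each record in a second pass.
import Mathlib
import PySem

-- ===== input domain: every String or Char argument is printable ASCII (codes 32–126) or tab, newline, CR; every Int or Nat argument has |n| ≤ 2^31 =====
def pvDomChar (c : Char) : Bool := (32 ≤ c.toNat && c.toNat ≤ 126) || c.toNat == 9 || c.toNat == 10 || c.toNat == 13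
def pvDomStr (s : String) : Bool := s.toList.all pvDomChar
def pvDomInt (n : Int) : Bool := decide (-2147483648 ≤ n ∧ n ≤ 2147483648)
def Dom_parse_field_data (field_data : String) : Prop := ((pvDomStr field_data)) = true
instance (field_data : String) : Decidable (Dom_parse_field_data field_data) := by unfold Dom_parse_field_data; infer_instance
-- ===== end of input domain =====

-- B replaces A's flush-on-delimiter accumulator by a two-phase segment-then-build decomposition (same cost; objective: alternative).

-- ===== PORT A =====
-- flush: "if current_field.get('name'): fields[current_field['name']] = current_field"
def pvA_flush (fields : PySem.Dict String (PySem.Dict String String))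
    (cur : PySem.Dict String String) : PySem.Dict String (PySem.Dict String String) :=
  if cur.getD "name" "" ≠ "" then fields.insert (cur.getD "name" "") cur else fields

-- one iteration of A's loop over the lines
def pvA_step (st : PySem.Dict String (PySem.Dict String String) × PySem.Dict String String)
    (raw : String) : PySem.Dict String (PySem.Dict String String) × PySem.Dict String String :=
  let line := PySem.Str.strip raw
  if PySem.Str.startswith line "FieldName:" then
    (pvA_flush st.1 st.2,
     (PySem.Dict.empty).insert "name" (PySem.Str.strip (PySem.Str.replace line "FieldName:" "")))
  else if PySem.Str.startswith line "FieldType:" then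
    (st.1, st.2.insert "type" (PySem.Str.strip (PySem.Str.replace line "FieldType:" "")))
  else if PySem.Str.startswith line "FieldFlags:" then
    (st.1, st.2.insert "flags" (PySem.Str.strip (PySem.Str.replace line "FieldFlags:" "")))
  else if PySem.Str.startswith line "FieldValue:" then
    (st.1, st.2.insert "value" (PySem.Str.strip (PySem.Str.replace line "FieldValue:" "")))
  else st

def parse_field_data (field_data : String) : List (String × List (String × String)) :=
  let st := ((PySem.Str.split? field_data "\n").getD []).foldl pvA_step (PySem.Dict.empty, PySem.Dict.empty)
  (pvA_flush st.1 st.2).items.map (fun p => (p.1, p.2.items))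

-- ===== PORT B =====
def pvB_notFN (l : String) : Bool := !(PySem.Str.startswith l "FieldName:")

-- apply one body line of a record to the record dict
def pvB_sub (r : PySem.Dict String String) (l : String) : PySem.Dict String String :=
  if PySem.Str.startswith l "FieldType:" then
    r.insert "type" (PySem.Str.strip (PySem.Str.replace l "FieldType:" ""))
  else if PySem.Str.startswith l "FieldFlags:" then
    r.insert "flags" (PySem.Str.strip (PySem.Str.replace l "FieldFlags:" ""))
  else if PySem.Str.startswith l "FieldValue:" then
    r.insert "value" (PySem.Str.strip (PySem.Str.replace l "FieldValue:" ""))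
  else r

-- phase 1: partition (lines whose head starts with 'FieldName:') into (header, body) records
def pvB_segment : List String → List (String × List String)
  | [] => []
  | l :: rest => (l, rest.takeWhile pvB_notFN) :: pvB_segment (rest.dropWhile pvB_notFN)
termination_by ls => ls.length
decreasing_by
  simpa [Nat.lt_succ_iff] using List.length_dropWhile_le pvB_notFN rest

-- phase 2: build one record and store it under its name (empty names dropped)
def pvB_addRec (fields : PySem.Dict String (PySem.Dict String String))
    (r : String × List String) : PySem.Dict String (PySem.Dict String String) :=
  let name := PySem.Str.strip (PySem.Str.replace r.1 "FieldName:" "")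
  let rec1 := r.2.foldl pvB_sub ((PySem.Dict.empty).insert "name" name)
  if name ≠ "" then fields.insert name rec1 else fields

def parse_field_data_alt (field_data : String) : List (String × List (String × String)) :=
  let lines := ((PySem.Str.split? field_data "\n").getD []).map PySem.Str.strip
  let fields := (pvB_segment (lines.dropWhile pvB_notFN)).foldl pvB_addRec PySem.Dict.empty
  fields.items.map (fun p => (p.1, p.2.items))

-- ===== PRECONDITION & SPEC =====
def Spec_parse_field_data (field_data : String) (out : List (String × List (String × String))) : Prop := out = parse_field_data_alt field_data
instance (field_data : String) (out : List (String × List (String × String))) : Decidable (Spec_parse_field_data field_data out) := by unfold Spec_parse_field_data; infer_instance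

-- ===== CLAIM (what is proved, stated in full; the proofs are below) =====
def Claim_equal_parse_field_data : Prop := ∀ (field_data : String), Dom_parse_field_data field_data → Spec_parse_field_data field_data (parse_field_data field_data)

-- ===== LEMMAS AND PROOFS =====

-- body lines never touch the "name" key
lemma pvB_sub_getD_name (r : PySem.Dict String String) (l : String) :
    (pvB_sub r l).getD "name" "" = r.getD "name" "" := by
  unfold pvB_sub
  split_ifs <;> simp [PySem.Dict.getD_insert]

lemma pvB_foldl_getD_name (body : List String) (r : PySem.Dict String String) :
    (body.foldl pvB_sub r).getD "name" "" = r.getD "name" "" := by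
  induction body generalizing r with
  | nil => rfl
  | cons l rest ih => simp [List.foldl_cons, ih, pvB_sub_getD_name]

-- building one record from (header, body) is A's flush of the accumulated current_field
lemma pvB_addRec_eq_flush (F : PySem.Dict String (PySem.Dict String String))
    (head : String) (body : List String) :
    pvB_addRec F (head, body)
      = pvA_flush F (body.foldl pvB_sub
          ((PySem.Dict.empty).insert "name" (PySem.Str.strip (PySem.Str.replace head "FieldName:" "")))) := by
  unfold pvB_addRec pvA_flush
  simp [pvB_foldl_getD_name, PySem.Dict.getD_insert_self]

-- the non-FieldName branches of A's step are exactly pvB_sub on the stripped line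
lemma pvA_step_of_notFN (st : PySem.Dict String (PySem.Dict String String) × PySem.Dict String String)
    (raw : String) (h : PySem.Str.startswith (PySem.Str.strip raw) "FieldName:" = false) :
    pvA_step st raw = (st.1, pvB_sub st.2 (PySem.Str.strip raw)) := by
  simp only [pvA_step, pvB_sub]
  rw [h]
  simp only [Bool.false_eq_true, if_false]
  split_ifs <;> rfl

-- main invariant: A's fold-then-flush equals B's segment-then-build, for any start state
lemma pvMain (lines : List String) (fields : PySem.Dict String (PySem.Dict String String))
    (cur : PySem.Dict String String) :
    pvA_flush (lines.foldl pvA_step (fields, cur)).1 (lines.foldl pvA_step (fields, cur)).2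
      = (pvB_segment ((lines.map PySem.Str.strip).dropWhile pvB_notFN)).foldl pvB_addRec
          (pvA_flush fields (((lines.map PySem.Str.strip).takeWhile pvB_notFN).foldl pvB_sub cur)) := by
  induction lines generalizing fields cur with
  | nil => simp [pvB_segment]
  | cons l rest ih =>
    by_cases h : PySem.Str.startswith (PySem.Str.strip l) "FieldName:" = true
    · have hn : pvB_notFN (PySem.Str.strip l) = false := by
        simp only [pvB_notFN, h, Bool.not_true]
      have hstep : pvA_step (fields, cur) l
          = (pvA_flush fields cur,
             (PySem.Dict.empty).insert "name"
               (PySem.Str.strip (PySem.Str.replace (PySem.Str.strip l) "FieldName:" ""))) := by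
        simp only [pvA_step]
        rw [if_pos h]
      rw [List.map_cons, List.dropWhile_cons_of_neg (by simp [hn]),
          List.takeWhile_cons_of_neg (by simp [hn])]
      rw [pvB_segment, List.foldl_cons, List.foldl_cons, hstep, ih]
      rw [pvB_addRec_eq_flush]
      simp
    · have h' : PySem.Str.startswith (PySem.Str.strip l) "FieldName:" = false := by
        simpa using h
      have hn : pvB_notFN (PySem.Str.strip l) = true := by
        simp only [pvB_notFN, h', Bool.not_false]
      rw [List.map_cons, List.dropWhile_cons_of_pos (by simp [hn]),
          List.takeWhile_cons_of_pos (by simp [hn])]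
      rw [List.foldl_cons, List.foldl_cons, pvA_step_of_notFN _ _ h', ih]

-- a record that never received a name is dropped by the flush
lemma pvA_flush_no_name (fields : PySem.Dict String (PySem.Dict String String)) (body : List String) :
    pvA_flush fields (body.foldl pvB_sub PySem.Dict.empty) = fields := by
  unfold pvA_flush
  simp [pvB_foldl_getD_name, PySem.Dict.getD_empty]

-- ===== VERDICT (by name: the statement is the Claim_ definition above) =====
theorem parse_field_data_spec : Claim_equal_parse_field_data := by
  intro s _
  unfold Spec_parse_field_data
  simp only [parse_field_data, parse_field_data_alt]
  rw [pvMain, pvA_flush_no_name]
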